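-- pv_equiv track=rewrite | github.com/hyungyu-02/Algorithm_PS | implementation/pg_영어_끝말잇기.py | solution
-- ===== SOURCE A (Python) =====
-- def solution(n, words):
--     answer = []
--
--     used_words = set()
--     used_words.add(words[0])
--
--     for i in range(1, len(words)):
--         if words[i] in used_words or words[i-1][-1] != words[i][0]:
--             return [i%n + 1, i//n + 1]
--
--         used_words.add(words[i])
--
--     return [0, 0]
-- ===== SOURCE B (Python) =====
-- def solution(n, words):
--     # first turn whose word was already used (None if no repeat)
--     seen = set()
--     first_dup = None
--     for i, w in enumerate(words):
--         if w in seen: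
--             first_dup = i
--             break
--         seen.add(w)
--     # first chain break, scanned only over the turns the game actually reaches
--     limit = len(words) if first_dup is None else first_dup
--     offense = first_dup
--     for i in range(1, limit):
--         if words[i - 1][-1] != words[i][0]:
--             offense = i
--             break
--     if offense is None:
--         return [0, 0]
--     return [offense % n + 1, offense // n + 1]
-- ===== Notes on version B (the rewrite author's own statement) =====
-- stated objective: alternative
-- what changed: A fuses the duplicate test and the chain-break test into one early-returning loop over a growing seen-set; B runs two separate scans - first the duplicate scan over the whole list, then the chain-break scan over only the turns the game reaches - and renders the earlier offense once at the end.
import Mathlib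
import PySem

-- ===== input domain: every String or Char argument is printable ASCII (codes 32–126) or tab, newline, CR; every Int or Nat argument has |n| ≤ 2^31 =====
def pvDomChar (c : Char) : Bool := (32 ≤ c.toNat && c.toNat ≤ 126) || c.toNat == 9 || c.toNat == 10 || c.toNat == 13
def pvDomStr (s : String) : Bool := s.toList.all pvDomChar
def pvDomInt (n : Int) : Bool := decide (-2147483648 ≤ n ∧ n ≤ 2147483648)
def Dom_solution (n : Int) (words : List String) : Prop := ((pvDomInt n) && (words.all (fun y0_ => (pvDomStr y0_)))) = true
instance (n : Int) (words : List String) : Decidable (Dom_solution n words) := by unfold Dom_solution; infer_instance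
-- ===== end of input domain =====

-- B replaces A's fused early-return loop by two separate scans — the first duplicate turn over the
-- whole list, then the first chain break over only the turns the game reaches — an alternative
-- decomposition of the same cost.


-- ===== PORT A =====
-- A's 'for i in range(1, len(words))' loop with its early return, walking the suffix words[i:]
-- while remembering the previous word (words[i-1]) and the set of used words.
def solutionGo (n : Int) (prev : String) (rest : List String) (used : PySem.Set String) (i : Nat) : List Int :=
  match rest with
  | [] => [0, 0]
  | w :: tail =>
    if PySem.Set.contains used w || (PySem.Str.pyGet? prev (-1) != PySem.Str.pyGet? w 0) then
      [PySem.Int.mod (i : Int) n + 1, PySem.Int.floordiv (i : Int) n + 1]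
    else
      solutionGo n w tail (PySem.Set.add used w) (i + 1)

def solution (n : Int) (words : List String) : List Int :=
  -- used_words = set(); used_words.add(words[0]) — words[0] raises IndexError on [] (excluded by Pre_)
  let w0 := words.getD 0 ""
  solutionGo n w0 (words.drop 1) (PySem.Set.add PySem.Set.empty w0) 1

-- ===== PORT B =====
-- first i with words[i] already seen ('for i, w in enumerate(words)' with break)
def dupGo (seen : PySem.Set String) (ws : List String) (i : Nat) : Option Nat :=
  match ws with
  | [] => none
  | w :: rest => if PySem.Set.contains seen w then some i else dupGo (PySem.Set.add seen w) rest (i + 1)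

-- 'for i in range(1, limit)' with break; indices are in range (1 ≤ i < limit ≤ len words), so
-- words[i-1] / words[i] are ported exactly by getD
def breakGo (words : List String) (limit : Nat) (i : Nat) : Option Nat :=
  if _h : i < limit then
    if PySem.Str.pyGet? (words.getD (i - 1) "") (-1) != PySem.Str.pyGet? (words.getD i "") 0 then some i
    else breakGo words limit (i + 1)
  else none
  termination_by limit - i

def solution_alt (n : Int) (words : List String) : List Int :=
  let firstDup := dupGo PySem.Set.empty words 0
  let limit := match firstDup with | none => words.length | some d => d
  let offense := match breakGo words limit 1 with
    | some i => some i
    | none => firstDup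
  match offense with
  | none => [0, 0]
  | some i => [PySem.Int.mod (i : Int) n + 1, PySem.Int.floordiv (i : Int) n + 1]

-- ===== PRECONDITION & SPEC =====
-- offense predicates at turn i (closed-form conditions on the input, also used by the proofs)
def isDupB (words : List String) (i : Nat) : Bool := decide (words.getD i "" ∈ words.take i)
def isBreakB (words : List String) (i : Nat) : Bool :=
  PySem.Str.pyGet? (words.getD (i - 1) "") (-1) != PySem.Str.pyGet? (words.getD i "") 0
def offenseB (words : List String) (i : Nat) : Bool := isDupB words i || isBreakB words i

-- Pre_ excludes exactly the inputs where Python A raises: [] (IndexError on words[0]); a turn i the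
-- game reaches (no offense before i, no duplicate at i) whose tested pair contains an empty word
-- (IndexError on ""[-1] / ""[0]); and n = 0 when some offense is reached (ZeroDivisionError on i % n).
def Pre_solution (n : Int) (words : List String) : Prop :=
  words ≠ [] ∧
  (∀ i, 1 ≤ i → i < words.length →
    (∀ j, 1 ≤ j → j < i → ¬ offenseB words j = true) →
    ¬ isDupB words i = true →
    (words.getD (i - 1) "" ≠ "" ∧ words.getD i "" ≠ "")) ∧
  (n = 0 → ∀ i, 1 ≤ i → i < words.length → ¬ offenseB words i = true)
instance (n : Int) (words : List String) : Decidable (Pre_solution n words) := by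
  unfold Pre_solution; infer_instance

def pvWitness_solution : Int × List String := (3, ["ab", "bc", "cd"])

def Spec_solution (n : Int) (words : List String) (out : List Int) : Prop := out = solution_alt n words
instance (n : Int) (words : List String) (out : List Int) : Decidable (Spec_solution n words out) := by unfold Spec_solution; infer_instance

-- ===== CLAIM (what is proved, stated in full; the proofs are below) =====
def Claim_equal_solution : Prop := ∀ (n : Int) (words : List String), Dom_solution n words → Pre_solution n words → Spec_solution n words (solution n words)

-- ===== LEMMAS AND PROOFS =====

-- first index ≥ i below words.length satisfying p
def firstIdx (words : List String) (p : Nat → Bool) (i : Nat) : Option Nat :=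
  if _h : i < words.length then
    if p i then some i else firstIdx words p (i + 1)
  else none
  termination_by words.length - i

def render (n : Int) (o : Option Nat) : List Int :=
  match o with
  | none => [0, 0]
  | some i => [PySem.Int.mod (i : Int) n + 1, PySem.Int.floordiv (i : Int) n + 1]

def optMin : Option Nat → Option Nat → Option Nat
  | none, o => o
  | o, none => o
  | some i, some j => some (min i j)

theorem contains_eq_decide (s : PySem.Set String) (x : String) :
    PySem.Set.contains s x = decide (x ∈ s) := by
  simp [PySem.Set.contains_eq_listContains]

theorem drop_cons_facts (words : List String) (i : Nat) (w : String) (tail : List String)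
    (h : words.drop i = w :: tail) :
    i < words.length ∧ words.getD i "" = w ∧ words.drop (i + 1) = tail := by
  have hl : i < words.length := by
    by_contra hc
    rw [List.drop_eq_nil_of_le (by omega)] at h
    simp at h
  have hd := List.drop_eq_getElem_cons (l := words) hl
  rw [hd] at h
  simp only [List.cons.injEq] at h
  exact ⟨hl, by simp [List.getD_eq_getElem?_getD, List.getElem?_eq_getElem hl, h.1], h.2⟩

theorem firstIdx_stop (words : List String) (p : Nat → Bool) (i : Nat)
    (h : ¬ i < words.length) : firstIdx words p i = none := by
  rw [firstIdx]; simp [h]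

theorem firstIdx_step (words : List String) (p : Nat → Bool) (i : Nat)
    (h : i < words.length) :
    firstIdx words p i = if p i then some i else firstIdx words p (i + 1) := by
  rw [firstIdx]; simp [h]

theorem firstIdx_ge (words : List String) (p : Nat → Bool) :
    ∀ k i j, words.length - i ≤ k → firstIdx words p i = some j → i ≤ j := by
  intro k
  induction k with
  | zero =>
    intro i j hk h
    rw [firstIdx_stop words p i (by omega)] at h
    simp at h
  | succ k ih =>
    intro i j hk h
    by_cases hi : i < words.length
    · rw [firstIdx_step words p i hi] at h
      by_cases hp : p i
      · simp [hp] at h; omega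
      · simp [hp] at h
        have := ih (i + 1) j (by omega) h
        omega
    · rw [firstIdx_stop words p i hi] at h
      simp at h

theorem firstIdx_lt (words : List String) (p : Nat → Bool) :
    ∀ k i j, words.length - i ≤ k → firstIdx words p i = some j → j < words.length := by
  intro k
  induction k with
  | zero =>
    intro i j hk h
    rw [firstIdx_stop words p i (by omega)] at h
    simp at h
  | succ k ih =>
    intro i j hk h
    by_cases hi : i < words.length
    · rw [firstIdx_step words p i hi] at h
      by_cases hp : p i
      · simp [hp] at h; omega
      · simp [hp] at h
        exact ih (i + 1) j (by omega) h
    · rw [firstIdx_stop words p i hi] at h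
      simp at h

theorem firstIdx_or (words : List String) (p q : Nat → Bool) :
    ∀ k i, words.length - i ≤ k →
      firstIdx words (fun j => p j || q j) i = optMin (firstIdx words p i) (firstIdx words q i) := by
  intro k
  induction k with
  | zero =>
    intro i hk
    have hi : ¬ i < words.length := by omega
    rw [firstIdx_stop words _ i hi, firstIdx_stop words p i hi, firstIdx_stop words q i hi]
    rfl
  | succ k ih =>
    intro i hk
    by_cases hi : i < words.length
    · rw [firstIdx_step words _ i hi, firstIdx_step words p i hi, firstIdx_step words q i hi]
      by_cases hp : p i <;> by_cases hq : q i <;>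
        simp only [hp, hq, Bool.false_or, Bool.true_or, Bool.or_self, if_true]
      · simp [optMin]
      · cases hfq : firstIdx words q (i + 1) with
        | none => simp [optMin]
        | some j =>
          have := firstIdx_ge words q k (i + 1) j (by omega) hfq
          simp [optMin, Nat.min_eq_left (by omega : i ≤ j)]
      · cases hfp : firstIdx words p (i + 1) with
        | none => simp [optMin]
        | some j =>
          have := firstIdx_ge words p k (i + 1) j (by omega) hfp
          simp [optMin, Nat.min_eq_right (by omega : i ≤ j)]
      · exact ih (i + 1) (by omega)
    · rw [firstIdx_stop words _ i hi, firstIdx_stop words p i hi, firstIdx_stop words q i hi]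
      rfl

theorem solutionGo_eq (n : Int) (words : List String) :
    ∀ (rest : List String) (i : Nat) (used : PySem.Set String),
      1 ≤ i → words.drop i = rest →
      (∀ w, (w ∈ used ↔ w ∈ words.take i)) →
      solutionGo n (words.getD (i - 1) "") rest used i =
        render n (firstIdx words (offenseB words) i) := by
  intro rest
  induction rest with
  | nil =>
    intro i used hi hdrop hused
    have : ¬ i < words.length := by
      intro hc
      have := List.length_drop (l := words) (i := i)
      rw [hdrop] at this; simp at this; omega
    rw [firstIdx_stop words _ i this]
    simp [solutionGo, render]
  | cons w tail ih =>
    intro i used hi hdrop hused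
    obtain ⟨hl, hw, htail⟩ := drop_cons_facts words i w tail hdrop
    have hcond : (PySem.Set.contains used w ||
        (PySem.Str.pyGet? (words.getD (i - 1) "") (-1) != PySem.Str.pyGet? w 0)) =
        offenseB words i := by
      rw [contains_eq_decide, offenseB, isDupB, isBreakB, hw]
      congr 1
      exact decide_eq_decide.mpr (hused w)
    rw [firstIdx_step words _ i hl]
    by_cases hoff : offenseB words i = true
    · simp only [solutionGo]
      rw [hcond, if_pos hoff]
      simp [render, hoff]
    · simp only [solutionGo]
      rw [hcond, if_neg hoff]
      rw [if_neg hoff]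
      have hw' : words[i] = w := by
        simpa [List.getD_eq_getElem?_getD, List.getElem?_eq_getElem hl] using hw
      have hused' : ∀ x, (x ∈ PySem.Set.add used w ↔ x ∈ words.take (i + 1)) := by
        intro x
        simp [PySem.Set.mem_add, List.take_add_one, List.getElem?_eq_getElem hl, hw', hused x]
      have hrec := ih (i + 1) (PySem.Set.add used w) (by omega) htail hused'
      simp only [Nat.add_sub_cancel] at hrec
      rw [hw] at hrec
      exact hrec

theorem dupGo_eq (words : List String) :
    ∀ (rest : List String) (i : Nat) (seen : PySem.Set String),
      words.drop i = rest →
      (∀ w, (w ∈ seen ↔ w ∈ words.take i)) →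
      dupGo seen rest i = firstIdx words (isDupB words) i := by
  intro rest
  induction rest with
  | nil =>
    intro i seen hdrop hseen
    have : ¬ i < words.length := by
      by_contra hc
      have := List.length_drop (l := words) (i := i)
      rw [hdrop] at this; simp at this; omega
    rw [firstIdx_stop words _ i this]
    rfl
  | cons w tail ih =>
    intro i seen hdrop hseen
    obtain ⟨hl, hw, htail⟩ := drop_cons_facts words i w tail hdrop
    have hw' : words[i] = w := by
      simpa [List.getD_eq_getElem?_getD, List.getElem?_eq_getElem hl] using hw
    have hcond : PySem.Set.contains seen w = isDupB words i := by
      rw [contains_eq_decide, isDupB, hw]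
      exact decide_eq_decide.mpr (hseen w)
    rw [firstIdx_step words _ i hl]
    simp only [dupGo]
    rw [hcond]
    by_cases hd : isDupB words i = true
    · simp [hd]
    · simp only [hd, if_false, Bool.false_eq_true]
      have hseen' : ∀ x, (x ∈ PySem.Set.add seen w ↔ x ∈ words.take (i + 1)) := by
        intro x
        simp [PySem.Set.mem_add, List.take_add_one, List.getElem?_eq_getElem hl, hw', hseen x]
      exact ih (i + 1) (PySem.Set.add seen w) htail hseen'

-- the bounded break scan is the filtered unbounded first-break search
theorem breakGo_eq (words : List String) (limit : Nat) (hlim : limit ≤ words.length) :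
    ∀ k i, limit - i ≤ k →
      breakGo words limit i =
        (firstIdx words (isBreakB words) i).bind (fun b => if b < limit then some b else none) := by
  intro k
  induction k with
  | zero =>
    intro i hk
    have hi : ¬ i < limit := by omega
    rw [breakGo]; simp only [hi, dite_false]
    cases hf : firstIdx words (isBreakB words) i with
    | none => rfl
    | some b =>
      have := firstIdx_ge words (isBreakB words) words.length i b (by omega) hf
      simp [show ¬ b < limit by omega]
  | succ k ih =>
    intro i hk
    by_cases hi : i < limit
    · rw [breakGo]; simp only [hi, dite_true]
      have hc : (PySem.Str.pyGet? (words.getD (i - 1) "") (-1) != PySem.Str.pyGet? (words.getD i "") 0)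
          = isBreakB words i := rfl
      rw [hc, firstIdx_step words _ i (by omega)]
      by_cases hb : isBreakB words i = true
      · simp [hb, hi]
      · simp only [hb, Bool.false_eq_true, if_false]
        exact ih (i + 1) (by omega)
    · rw [breakGo]; simp only [hi, dite_false]
      cases hf : firstIdx words (isBreakB words) i with
      | none => rfl
      | some b =>
        have := firstIdx_ge words (isBreakB words) words.length i b (by omega) hf
        simp [show ¬ b < limit by omega]

-- ===== VERDICT (by name: the statement is the Claim_ definition above) =====
theorem solution_spec : Claim_equal_solution := by
  intro n words _ hpre
  unfold Spec_solution
  obtain ⟨hne, -, -⟩ := hpre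
  have hlen : 0 < words.length := List.length_pos_iff.mpr hne
  have hA : solution n words = render n (firstIdx words (offenseB words) 1) := by
    unfold solution
    apply solutionGo_eq n words (words.drop 1) 1 _ (by omega) rfl
    intro x
    have : words.take 1 = [words.getD 0 ""] := by
      cases words with
      | nil => simp at hlen
      | cons a l => simp
    rw [this]
    simp [PySem.Set.empty]
  have hd : dupGo PySem.Set.empty words 0 = firstIdx words (isDupB words) 0 := by
    apply dupGo_eq words words 0 PySem.Set.empty rfl
    intro x
    simp [PySem.Set.empty]
  have hd1 : firstIdx words (isDupB words) 0 = firstIdx words (isDupB words) 1 := by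
    rw [firstIdx_step words _ 0 hlen]
    simp [isDupB]
  have hor := firstIdx_or words (isDupB words) (isBreakB words) words.length 1 (by omega)
  have hor' : firstIdx words (offenseB words) 1 =
      optMin (firstIdx words (isDupB words) 1) (firstIdx words (isBreakB words) 1) := by
    rw [← hor]
    congr 1
  rw [hA, hor']
  simp only [solution_alt]
  rw [hd, hd1]
  cases hfd : firstIdx words (isDupB words) 1 with
  | none =>
    rw [breakGo_eq words words.length (le_refl _) words.length 1 (by omega)]
    cases hfb : firstIdx words (isBreakB words) 1 with
    | none => simp [render, optMin]
    | some b =>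
      have := firstIdx_lt words (isBreakB words) words.length 1 b (by omega) hfb
      simp [render, optMin, this]
  | some d =>
    have hd_ge : 1 ≤ d := firstIdx_ge words (isDupB words) words.length 1 d (by omega) hfd
    have hd_lt : d < words.length := firstIdx_lt words (isDupB words) words.length 1 d (by omega) hfd
    rw [breakGo_eq words d (by omega) d 1 (by omega)]
    cases hfb : firstIdx words (isBreakB words) 1 with
    | none => simp [render, optMin]
    | some b =>
      by_cases hbd : b < d
      · simp [render, optMin, hbd, Nat.min_eq_right (by omega : b ≤ d)]
      · simp [render, optMin, hbd, Nat.min_eq_left (by omega : d ≤ b)]
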